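-- pv_equiv track=rewrite | github.com/ElenaGll/pythonP | brain_tasks/tasks/examples.py | sort_by_ext
-- ===== SOURCE A (Python) =====
-- def sort_by_ext(files):
--     new_files = []
--     for file in files:
--         new_files.append(file.split('.'))
--     sorted_files = sorted(new_files)
--
--     len_files = []
--     for file in sorted_files:
--         len_files.append(len(file))
--     sorted_len = sorted(set(len_files))
--
--     result = []
--     for i in sorted_len:
--         for file in sorted_files:
--             if len(file) == i:
--                 result.append(file)
--
--     result_files = []
--     for file in result:
--         result_files.append('.'.join(file))
--
--     return result_files
-- ===== SOURCE B (Python) =====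
-- def sort_by_ext(files):
--     buckets = {}
--     for f in files:
--         p = f.split('.')
--         buckets.setdefault(len(p), []).append(p)
--     out = []
--     for n in sorted(buckets):
--         for p in sorted(buckets[n]):
--             out.append('.'.join(p))
--     return out
-- ===== Notes on version B (the rewrite author's own statement) =====
-- stated objective: alternative
-- what changed: B builds a dict bucketing the '.'-split segment lists by segment count in one pass, then walks the keys in ascending order sorting each bucket lexicographically, instead of A's global lexicographic sort followed by a full filtering rescan of the sorted list for every distinct depth.
import Mathlib
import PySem

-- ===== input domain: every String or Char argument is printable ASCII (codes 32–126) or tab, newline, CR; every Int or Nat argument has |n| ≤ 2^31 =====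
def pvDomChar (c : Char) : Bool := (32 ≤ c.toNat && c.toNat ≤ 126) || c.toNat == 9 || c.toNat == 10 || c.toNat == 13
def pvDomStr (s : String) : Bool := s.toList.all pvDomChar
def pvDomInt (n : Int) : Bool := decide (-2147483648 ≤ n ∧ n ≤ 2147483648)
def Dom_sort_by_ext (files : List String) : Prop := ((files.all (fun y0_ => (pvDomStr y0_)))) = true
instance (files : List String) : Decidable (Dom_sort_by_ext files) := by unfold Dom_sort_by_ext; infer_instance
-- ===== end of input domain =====

-- B groups the split names into a dict keyed by segment count and sorts each bucket, replacing
-- A's global sort plus one full filtering rescan per distinct depth (alternative decomposition).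

-- f.split('.'): the separator "." is nonempty, so PySem.Str.split? is always `some`; the `.getD []` fallback is never taken
def pySplitDot (f : String) : List String := (PySem.Str.split? f ".").getD []

-- ===== PORT A =====
def sort_by_ext (files : List String) : List String :=
  let new_files := files.foldl (fun acc f => acc ++ [pySplitDot f]) []
  let sorted_files := PySem.List.sorted new_files (fun p => p) false
  let len_files := sorted_files.foldl (fun acc p => acc ++ [PySem.List.len p]) []
  let sorted_len := PySem.List.sorted (PySem.Set.ofList len_files) (fun x => x) false
  let result := sorted_len.foldl (fun acc i =>
      sorted_files.foldl (fun acc2 p => if PySem.List.len p == i then acc2 ++ [p] else acc2) acc) []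
  result.foldl (fun acc p => acc ++ [PySem.Str.join "." p]) []

-- ===== PORT B =====
def sort_by_ext_alt (files : List String) : List String :=
  let buckets := files.foldl (fun d f =>
      let p := pySplitDot f
      d.modify (PySem.List.len p) [] (fun b => b ++ [p])) PySem.Dict.empty
  -- `buckets[n]`: n ranges over the keys, so the lookup always succeeds; getD's [] is never taken
  (PySem.List.sorted buckets.keys (fun n => n) false).foldl (fun out n =>
      (PySem.List.sorted (buckets.getD n []) (fun p => p) false).foldl
        (fun out2 p => out2 ++ [PySem.Str.join "." p]) out) []

-- ===== PRECONDITION & SPEC =====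
def Spec_sort_by_ext (files : List String) (out : List String) : Prop := out = sort_by_ext_alt files
instance (files : List String) (out : List String) : Decidable (Spec_sort_by_ext files out) := by unfold Spec_sort_by_ext; infer_instance

-- ===== CLAIM (what is proved, stated in full; the proofs are below) =====
def Claim_equal_sort_by_ext : Prop := ∀ (files : List String), Dom_sort_by_ext files → Spec_sort_by_ext files (sort_by_ext files)

-- ===== LEMMAS AND PROOFS =====

-- two Decidable instances for the same order sort identically
theorem sorted_dec_congr {α κ : Type} [LT κ] (d1 d2 : DecidableLT κ)
    (xs : List α) (key : α → κ) (rev : Bool) :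
    @PySem.List.sorted α κ _ d1 xs key rev = @PySem.List.sorted α κ _ d2 xs key rev := by
  have : d1 = d2 := by funext a b; exact Subsingleton.elim _ _
  rw [this]

-- A's per-depth filter over the globally sorted splits IS the sorted per-depth bucket
theorem filter_sorted_eq_sorted_filter (S : List (List String)) (n : Int) :
    (PySem.List.sorted S (fun p => p) false).filter (fun p => PySem.List.len p == n)
      = PySem.List.sorted (S.filter (fun p => PySem.List.len p == n)) (fun p => p) false := by
  rw [sorted_dec_congr _ (@LinearOrder.toDecidableLT _ List.instLinearOrder) S,
      sorted_dec_congr _ (@LinearOrder.toDecidableLT _ List.instLinearOrder) (S.filter _)]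
  apply PySem.List.eq_of_perm_of_pairwise_le_of_injective (fun p => p) (fun _ _ h => h)
  · exact ((@PySem.List.sorted_perm _ _ _ LinearOrder.toDecidableLT S _ false).filter _).trans
      (@PySem.List.sorted_perm _ _ _ LinearOrder.toDecidableLT (S.filter _) _ false).symm
  · exact (PySem.List.sorted_pairwise S (fun p => p)).sublist List.filter_sublist
  · exact PySem.List.sorted_pairwise _ (fun p => p)

-- the distinct depths of the sorted splits and of the raw splits agree after sorting
theorem sorted_lens_eq (S : List (List String)) :
    PySem.List.sorted (PySem.Set.ofList ((PySem.List.sorted S (fun p => p) false).map PySem.List.len)) (fun x => x) false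
      = PySem.List.sorted (PySem.Set.ofList (S.map PySem.List.len)) (fun x => x) false := by
  rw [sorted_dec_congr _ (@LinearOrder.toDecidableLT _ Int.instLinearOrder) (PySem.Set.ofList _),
      sorted_dec_congr _ (@LinearOrder.toDecidableLT _ Int.instLinearOrder) (PySem.Set.ofList (S.map _))]
  apply PySem.List.sorted_eq_sorted_of_perm _ _ _ (fun _ _ h => h)
  refine (List.perm_ext_iff_of_nodup (PySem.Set.nodup_ofList _) (PySem.Set.nodup_ofList _)).mpr ?_
  intro a
  simp only [PySem.Set.mem_ofList, List.mem_map]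
  exact ⟨fun ⟨p, hp, h⟩ => ⟨p, (@PySem.List.sorted_perm _ _ List.instLT (fun a b => a.decidableLT b) S _ false).mem_iff.mp hp, h⟩,
         fun ⟨p, hp, h⟩ => ⟨p, (@PySem.List.sorted_perm _ _ List.instLT (fun a b => a.decidableLT b) S _ false).mem_iff.mpr hp, h⟩⟩

-- ===== VERDICT (by name: the statement is the Claim_ definition above) =====
theorem sort_by_ext_spec : Claim_equal_sort_by_ext := by
  intro files _
  unfold Spec_sort_by_ext sort_by_ext sort_by_ext_alt
  -- B's dict: its keys are the distinct depths (first-occurrence order), its buckets the per-depth filters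
  have hkeys : (files.foldl (fun d f =>
      d.modify (PySem.List.len (pySplitDot f)) [] (fun b => b ++ [pySplitDot f])) PySem.Dict.empty).keys
      = PySem.Set.ofList ((files.map pySplitDot).map PySem.List.len) := by
    rw [PySem.Dict.keys_foldl_modify_key files (fun f => PySem.List.len (pySplitDot f)) []
      (fun _ f => (fun b => b ++ [pySplitDot f])) PySem.Dict.empty]
    simp [PySem.Dict.keys_empty, PySem.Set.update, PySem.Set.ofList_eq_foldl, List.map_map,
      Function.comp_def]
  have hgetD : ∀ n, (files.foldl (fun d f =>
      d.modify (PySem.List.len (pySplitDot f)) [] (fun b => b ++ [pySplitDot f])) PySem.Dict.empty).getD n []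
      = (files.map pySplitDot).filter (fun p => PySem.List.len p == n) := by
    intro n
    have h1 : files.foldl (fun d f => d.modify (PySem.List.len (pySplitDot f)) [] (fun b => b ++ [pySplitDot f])) PySem.Dict.empty
        = (files.map (fun f => (PySem.List.len (pySplitDot f), pySplitDot f))).foldl
            (fun d q => d.modify q.1 [] (fun b => b ++ [q.2])) PySem.Dict.empty := by
      rw [List.foldl_map]
    rw [h1, PySem.Dict.getD_foldl_modify_append, PySem.Dict.getD_empty]
    simp [List.filter_map, Function.comp_def, List.map_map]
  -- turn both loop nests into their flatMap/filter/map shapes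
  simp only [hkeys, hgetD, PySem.List.foldl_append_singleton_eq_map,
    PySem.List.foldl_append_if_eq_filter, PySem.List.foldl_append_eq_flatMap, List.nil_append]
  rw [sorted_lens_eq, List.map_flatMap]
  exact List.flatMap_congr (fun i _ => by rw [filter_sorted_eq_sorted_filter])
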